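-- pv_equiv track=rewrite | github.com/symplicial/splitutils | worst_viable_run/optimize.py | segmentsToSplits
-- ===== SOURCE A (Python) =====
-- def segmentsToSplits(segments):
--   splits = []
--   for j in range(0, len(segments)):
--     split = 0
--     for i in range(0, j + 1):
--       split += segments[i]
--     splits.append(split)
--   return splits
-- ===== SOURCE B (Python) =====
-- def segmentsToSplits(segments):
--   splits = []
--   total = 0
--   for s in segments:
--     total += s
--     splits.append(total)
--   return splits
-- ===== Notes on version B (the rewrite author's own statement) =====
-- stated objective: faster
-- what changed: Replaced the nested loop that re-sums the prefix for every index with a single pass keeping a running total.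
import Mathlib
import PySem

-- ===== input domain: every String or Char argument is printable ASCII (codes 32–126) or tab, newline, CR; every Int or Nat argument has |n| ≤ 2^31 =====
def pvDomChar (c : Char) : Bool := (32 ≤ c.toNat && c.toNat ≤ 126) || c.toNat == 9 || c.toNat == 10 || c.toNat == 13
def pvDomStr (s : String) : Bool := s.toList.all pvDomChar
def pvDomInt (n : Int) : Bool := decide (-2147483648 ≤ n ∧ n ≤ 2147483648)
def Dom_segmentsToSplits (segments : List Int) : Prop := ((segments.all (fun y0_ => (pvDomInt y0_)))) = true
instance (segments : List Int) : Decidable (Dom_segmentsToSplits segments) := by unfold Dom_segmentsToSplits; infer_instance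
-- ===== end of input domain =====

-- B replaces A's nested re-summation of every prefix with a single pass keeping a running total (O(n) instead of O(n^2)).

-- ===== PORT A =====
-- literal port of A: for j in range(len(segments)): re-sum segments[0..j] and append.
-- pyGetD is exact here: every index i satisfies 0 ≤ i < len(segments).
def segmentsToSplits (segments : List Int) : List Int :=
  (PySem.List.pyRange 0 (segments.length : Int) 1).foldl
    (fun splits j =>
      splits ++ [(PySem.List.pyRange 0 (j + 1) 1).foldl
        (fun split i => split + PySem.List.pyGetD segments i 0) 0]) []

-- ===== PORT B =====
-- running-total single pass (Source B's loop as structural recursion over the list)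
def segsToSplitsGo (total : Int) : List Int → List Int
  | [] => []
  | s :: rest => (total + s) :: segsToSplitsGo (total + s) rest

def segmentsToSplits_alt (segments : List Int) : List Int :=
  segsToSplitsGo 0 segments

-- ===== PRECONDITION & SPEC =====
def Spec_segmentsToSplits (segments : List Int) (out : List Int) : Prop := out = segmentsToSplits_alt segments
instance (segments : List Int) (out : List Int) : Decidable (Spec_segmentsToSplits segments out) := by unfold Spec_segmentsToSplits; infer_instance

-- ===== CLAIM (what is proved, stated in full; the proofs are below) =====
def Claim_equal_segmentsToSplits : Prop := ∀ (segments : List Int), Dom_segmentsToSplits segments → Spec_segmentsToSplits segments (segmentsToSplits segments)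

-- ===== LEMMAS AND PROOFS =====

-- A's inner loop: summing segments[0..k-1] is the sum of the first k elements.
theorem innerA (segments : List Int) (k : Nat) (hk : k ≤ segments.length) :
    (PySem.List.pyRange 0 (k : Int) 1).foldl
      (fun split i => split + PySem.List.pyGetD segments i 0) 0
      = (segments.take k).sum := by
  induction k with
  | zero => simp [PySem.List.pyRange_one_eq_nil]
  | succ n ih =>
    have h1 : ((n + 1 : Nat) : Int) = (n : Int) + 1 := by push_cast; ring
    rw [h1, PySem.List.pyRange_one_succ_right (by positivity), List.foldl_append,
      ih (Nat.le_of_succ_le hk)]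
    have hn : n < segments.length := hk
    simp [List.sum_take_succ _ _ hn, List.getElem?_eq_getElem hn]

-- B's recursion computes the prefix sums shifted by the accumulator.
theorem altGo_eq (l : List Int) (t : Int) :
    segsToSplitsGo t l
      = (List.range l.length).map (fun n => t + (l.take (n + 1)).sum) := by
  induction l generalizing t with
  | nil => simp [segsToSplitsGo]
  | cons x xs ih =>
    simp [segsToSplitsGo, ih (t + x), List.range_succ_eq_map, List.map_map,
      Function.comp_def, add_assoc]

-- ===== VERDICT (by name: the statement is the Claim_ definition above) =====
theorem segmentsToSplits_spec : Claim_equal_segmentsToSplits := by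
  intro segments _
  show segmentsToSplits segments = segmentsToSplits_alt segments
  rw [segmentsToSplits, segmentsToSplits_alt, altGo_eq,
    PySem.List.foldl_append_singleton_eq_map, List.nil_append,
    PySem.List.pyRange_one, List.map_map]
  simp only [Int.sub_zero, Int.toNat_natCast]
  apply List.map_congr_left
  intro k hk
  rw [List.mem_range] at hk
  have : ((k + 1 : Nat) : Int) = (0 : Int) + (k : Int) + 1 := by push_cast; ring
  rw [Function.comp_apply, ← this, innerA segments (k + 1) (by omega)]
  exact (zero_add _).symm
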